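-- pv_equiv track=rewrite | github.com/kasperallais/class | algo/flowers/main.py | max_beauty_dp
-- ===== SOURCE A (Python) =====
-- def max_beauty_dp(flowers):
--     n = len(flowers)
--     # prefix sums for O(1) range‐sum queries
--     prefix = [0]*(n+1)
--     for k in range(1, n+1):
--         prefix[k] = prefix[k-1] + flowers[k-1]
--     def total(a, b):
--         return prefix[b+1] - prefix[a]
--
--     dp = [[0]*n for _ in range(n)]
--     for i in range(n):
--         dp[i][i] = flowers[i]
--     for L in range(2, n+1):
--         for i in range(n-L+1):
--             j = i + L - 1
--             dp[i][j] = total(i, j) - min(dp[i+1][j], dp[i][j-1])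
--     return dp[0][n-1]
-- ===== SOURCE B (Python) =====
-- def max_beauty_dp(flowers):
--     # Difference-game formulation: d[i] holds diff(i, j) = best (current player's
--     # score minus opponent's score) on flowers[i..j], swept column by column
--     # (j left-to-right, i downward in place).  The first player's absolute score
--     # is then (sum + diff(0, n-1)) // 2.  One 1-D array, no prefix sums, no
--     # range-sum queries, no n x n table.
--     n = len(flowers)
--     d = [0] * n
--     for j in range(n):
--         d[j] = flowers[j]
--         for i in range(j - 1, -1, -1):
--             d[i] = max(flowers[i] - d[i + 1], flowers[j] - d[i])
--     return (sum(flowers) + d[0]) // 2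
-- ===== Notes on version B (the rewrite author's own statement) =====
-- stated objective: alternative
-- what changed: Replaces the score DP (prefix-sum array + full n-by-n table, dp[i][j]=rangesum-min(...)) with the difference-game recurrence d[i][j]=max(f[i]-d[i+1][j], f[j]-d[i][j-1]) swept column-by-column in a single 1-D array in place, recovering the score as (sum(flowers)+d)//2; no prefix sums, no range-sum queries, no 2-D table.
import Mathlib
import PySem

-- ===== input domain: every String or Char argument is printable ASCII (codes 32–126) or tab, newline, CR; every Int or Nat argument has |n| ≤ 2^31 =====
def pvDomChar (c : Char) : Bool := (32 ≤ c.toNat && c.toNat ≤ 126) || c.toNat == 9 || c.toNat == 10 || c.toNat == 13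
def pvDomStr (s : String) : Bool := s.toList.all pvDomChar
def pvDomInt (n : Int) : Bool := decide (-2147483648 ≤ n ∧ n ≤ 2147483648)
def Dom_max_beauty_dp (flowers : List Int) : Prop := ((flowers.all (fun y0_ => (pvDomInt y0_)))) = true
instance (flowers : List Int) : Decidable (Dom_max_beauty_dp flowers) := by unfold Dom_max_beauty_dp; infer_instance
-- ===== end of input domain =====

-- B solves the equivalent difference game (d[i][j] = max(f[i]-d[i+1][j], f[j]-d[i][j-1]))
-- in one in-place 1-D array swept column by column and returns (sum+d)//2:
-- no prefix sums, no range-sum queries, no n×n table (objective: alternative).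

-- ===== PORT A =====
-- the Python lists `prefix` (1D) and `dp` (2D, list of rows) are ported as Lean
-- lists with List.set for element assignment; loop order and intermediate values are A's.
def max_beauty_dp (flowers : List Int) : Int :=
  let n := flowers.length
  -- for k in range(1, n+1): prefix[k] = prefix[k-1] + flowers[k-1]
  let pre : List Int :=
    (List.range' 1 n).foldl (fun p k => p.set k (p.getD (k-1) 0 + flowers.getD (k-1) 0))
      (List.replicate (n+1) 0)
  let total : Nat → Nat → Int := fun a b => pre.getD (b+1) 0 - pre.getD a 0
  -- for i in range(n): dp[i][i] = flowers[i]
  let dp1 : List (List Int) :=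
    (List.range n).foldl (fun d i => d.set i ((d.getD i []).set i (flowers.getD i 0)))
      (List.replicate n (List.replicate n 0))
  -- for L in range(2, n+1): for i in range(n-L+1): dp[i][j] = total(i,j) - min(dp[i+1][j], dp[i][j-1])
  let dp : List (List Int) :=
    (List.range' 2 (n-1)).foldl (fun d L =>
      (List.range (n-L+1)).foldl (fun d i =>
        let j := i + L - 1
        d.set i ((d.getD i []).set j
          (total i j - min ((d.getD (i+1) []).getD j 0) ((d.getD i []).getD (j-1) 0)))) d) dp1
  (dp.getD 0 []).getD (n-1) 0   -- dp[0][n-1]; on [] Python raises IndexError here (excluded by Pre_)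

-- ===== PORT B =====
-- the Python list `d` is ported with List.set; `for i in range(j-1, -1, -1)`
-- iterates i = j-1, j-2, …, 0, ported as (List.range j).reverse (the same sequence).
def max_beauty_dp_alt (flowers : List Int) : Int :=
  let n := flowers.length
  let d : List Int :=
    (List.range n).foldl (fun d j =>
      (List.range j).reverse.foldl
        (fun d i => d.set i (max (flowers.getD i 0 - d.getD (i+1) 0)
                                 (flowers.getD j 0 - d.getD i 0)))
        (d.set j (flowers.getD j 0)))
      (List.replicate n 0)
  PySem.Int.floordiv (flowers.sum + d.getD 0 0) 2   -- d[0]; on [] Python raises IndexError here (excluded by Pre_)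

-- ===== PRECONDITION & SPEC =====
-- Python A raises IndexError (dp[0][-1] on an empty table) exactly on the empty list.
def Pre_max_beauty_dp (flowers : List Int) : Prop := flowers ≠ []
instance (flowers : List Int) : Decidable (Pre_max_beauty_dp flowers) := by
  unfold Pre_max_beauty_dp; infer_instance
def pvWitness_max_beauty_dp : List Int := [3, 1, 5, 8]

def Spec_max_beauty_dp (flowers : List Int) (out : Int) : Prop := out = max_beauty_dp_alt flowers
instance (flowers : List Int) (out : Int) : Decidable (Spec_max_beauty_dp flowers out) := by unfold Spec_max_beauty_dp; infer_instance

-- ===== CLAIM (what is proved, stated in full; the proofs are below) =====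
def Claim_equal_max_beauty_dp : Prop := ∀ (flowers : List Int), Dom_max_beauty_dp flowers → Pre_max_beauty_dp flowers → Spec_max_beauty_dp flowers (max_beauty_dp flowers)

-- ===== LEMMAS AND PROOFS =====

-- reference recurrence: value of the game on flowers[i..j]
def pvSum (f : List Int) (i j : Nat) : Int := ((f.drop i).take (j+1-i)).sum

def pvG (f : List Int) (i j : Nat) : Int :=
  if j ≤ i then f.getD i 0
  else pvSum f i j - min (pvG f (i+1) j) (pvG f i (j-1))
termination_by j - i
decreasing_by all_goals omega

theorem pvG_le (f : List Int) (i j : Nat) (h : j ≤ i) : pvG f i j = f.getD i 0 := by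
  rw [pvG]; simp [h]

theorem pvG_lt (f : List Int) (i j : Nat) (h : i < j) :
    pvG f i j = pvSum f i j - min (pvG f (i+1) j) (pvG f i (j-1)) := by
  rw [pvG]; simp [Nat.not_le.mpr h]

theorem sum_take_succ (f : List Int) (k : Nat) :
    (f.take (k+1)).sum = (f.take k).sum + f.getD k 0 := by
  induction f generalizing k with
  | nil => simp
  | cons a l ih =>
    cases k with
    | zero => simp
    | succ k =>
      simp only [List.take_succ_cons, List.sum_cons, ih k, List.getD_cons_succ]
      omega

theorem pvSum_split (f : List Int) (a b : Nat) (h : a ≤ b + 1) :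
    pvSum f a b = (f.take (b+1)).sum - (f.take a).sum := by
  unfold pvSum
  have : f.take (b+1) = f.take a ++ (f.drop a).take (b+1-a) := by
    conv_lhs => rw [show b + 1 = a + (b + 1 - a) from by omega]
    rw [List.take_add]
  rw [this]; simp

theorem pv_getD_replicate {α : Type} (n k : Nat) (x dflt : α) :
    (List.replicate n x).getD k dflt = if k < n then x else dflt := by
  induction n generalizing k with
  | zero => simp
  | succ n ih =>
    cases k with
    | zero => simp [List.replicate_succ]
    | succ k =>
      show (List.replicate n x).getD k dflt = _
      rw [ih k]
      by_cases h : k < n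
      · rw [if_pos h, if_pos (by omega)]
      · rw [if_neg h, if_neg (by omega)]

theorem pv_getD_set {α : Type} (l : List α) (k k' : Nat) (v dflt : α) :
    (l.set k v).getD k' dflt = if k' = k ∧ k < l.length then v else l.getD k' dflt := by
  induction l generalizing k k' with
  | nil => simp
  | cons a t ih =>
    cases k with
    | zero =>
      cases k' with
      | zero => simp
      | succ k' => simp
    | succ k =>
      cases k' with
      | zero => simp
      | succ k' =>
        show (t.set k v).getD k' dflt = _
        rw [ih k k']
        by_cases h : k' = k ∧ k < t.length
        · rw [if_pos h, if_pos (show k' + 1 = k + 1 ∧ k + 1 < (a :: t).length from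
            ⟨by omega, by simp only [List.length_cons]; omega⟩)]
        · rw [if_neg h, if_neg (by simp only [List.length_cons]; omega)]
          rfl

-- the two one-step sum identities the difference-game proof needs
theorem pvSum_diag (f : List Int) (i : Nat) : pvSum f i i = f.getD i 0 := by
  have h1 := pvSum_split f i i (by omega)
  have h2 := sum_take_succ f i
  omega

theorem pvSum_head (f : List Int) (i j : Nat) (h : i < j) :
    pvSum f i j = f.getD i 0 + pvSum f (i+1) j := by
  have h1 := pvSum_split f i j (by omega)
  have h2 := pvSum_split f (i+1) j (by omega)
  have h3 := sum_take_succ f i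
  omega

theorem pvSum_last (f : List Int) (i j : Nat) (h : i < j) :
    pvSum f i j = pvSum f i (j-1) + f.getD j 0 := by
  have h1 := pvSum_split f i j (by omega)
  have h2 := pvSum_split f i (j-1) (by omega)
  have h3 := sum_take_succ f (j-1)
  have h5 := sum_take_succ f j
  have h4 : j - 1 + 1 = j := by omega
  rw [h4] at h2 h3
  omega

-- ——— B side: difference game ———

-- diff(i,j): current player's score minus opponent's on flowers[i..j]
def pvD (f : List Int) (i j : Nat) : Int :=
  if j ≤ i then f.getD i 0
  else max (f.getD i 0 - pvD f (i+1) j) (f.getD j 0 - pvD f i (j-1))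
termination_by j - i
decreasing_by all_goals omega

theorem pvD_eq (f : List Int) (i j : Nat) (hij : i ≤ j) :
    pvD f i j = 2 * pvG f i j - pvSum f i j := by
  by_cases h : j ≤ i
  · have : i = j := by omega
    subst this
    rw [pvD, pvG_le f i i (le_refl i), pvSum_diag]
    simp only [if_pos (le_refl i)]
    omega
  · have hlt : i < j := by omega
    rw [pvD, if_neg h, pvG_lt f i j hlt,
      pvD_eq f (i+1) j (by omega), pvD_eq f i (j-1) (by omega)]
    have hh := pvSum_head f i j hlt
    have hl := pvSum_last f i j hlt
    rcases le_total (pvG f (i+1) j) (pvG f i (j-1)) with hc | hc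
    · rw [min_eq_left hc, max_eq_left (by omega)]
      omega
    · rw [min_eq_right hc, max_eq_right (by omega)]
      omega
termination_by j - i
decreasing_by all_goals omega

-- proof-only names for the fold stages of port B (definitionally equal to its lets)
def pvInnerB (f : List Int) (j : Nat) (d : List Int) (k : Nat) : List Int :=
  (List.range k).reverse.foldl
    (fun d i => d.set i (max (f.getD i 0 - d.getD (i+1) 0) (f.getD j 0 - d.getD i 0))) d

def pvOuterB (f : List Int) (m : Nat) : List Int :=
  (List.range m).foldl (fun d j => pvInnerB f j (d.set j (f.getD j 0)) j)
    (List.replicate f.length 0)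

theorem pvInnerB_succ (f : List Int) (j : Nat) (d : List Int) (k : Nat) :
    pvInnerB f j d (k+1) =
      pvInnerB f j (d.set k (max (f.getD k 0 - d.getD (k+1) 0) (f.getD j 0 - d.getD k 0))) k := by
  unfold pvInnerB
  rw [List.range_succ, List.reverse_append]
  rfl

theorem pvOuterB_succ (f : List Int) (m : Nat) :
    pvOuterB f (m+1) = pvInnerB f m ((pvOuterB f m).set m (f.getD m 0)) m := by
  unfold pvOuterB
  rw [List.range_succ, List.foldl_append]
  rfl

theorem pvInnerB_spec (f : List Int) (j : Nat) (hj : j < f.length) :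
    ∀ k, k ≤ j → ∀ d : List Int, d.length = f.length →
      (∀ i, k ≤ i → i ≤ j → d.getD i 0 = pvD f i j) →
      (∀ i, i < k → d.getD i 0 = pvD f i (j-1)) →
      (pvInnerB f j d k).length = f.length ∧
        (∀ i, i ≤ j → (pvInnerB f j d k).getD i 0 = pvD f i j) := by
  intro k
  induction k with
  | zero =>
    intro _ d hdl hge _
    refine ⟨hdl, fun i hi => hge i (Nat.zero_le i) hi⟩
  | succ k ih =>
    intro hk d hdl hge hlt
    rw [pvInnerB_succ]
    have hkj : k < j := by omega
    have hv : max (f.getD k 0 - d.getD (k+1) 0) (f.getD j 0 - d.getD k 0) = pvD f k j := by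
      rw [hge (k+1) (le_refl _) (by omega), hlt k (by omega)]
      conv_rhs => rw [pvD]
      rw [if_neg (by omega)]
    set d' := d.set k (max (f.getD k 0 - d.getD (k+1) 0) (f.getD j 0 - d.getD k 0)) with hd'
    have hdl' : d'.length = f.length := by rw [hd', List.length_set]; exact hdl
    refine ih (by omega) d' hdl' ?_ ?_
    · intro i hki hij
      by_cases hik : i = k
      · subst hik
        rw [hd', pv_getD_set, if_pos ⟨rfl, by omega⟩, hv]
      · rw [hd', pv_getD_set, if_neg (by omega)]
        exact hge i (by omega) hij
    · intro i hik
      rw [hd', pv_getD_set, if_neg (by omega)]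
      exact hlt i (by omega)

theorem pvOuterB_spec (f : List Int) :
    ∀ m, m ≤ f.length →
      (pvOuterB f m).length = f.length ∧
        (∀ i, i < m → (pvOuterB f m).getD i 0 = pvD f i (m-1)) := by
  intro m
  induction m with
  | zero => exact fun _ => ⟨by simp [pvOuterB], fun i hi => absurd hi (by omega)⟩
  | succ m ih =>
    intro hm
    obtain ⟨hlen, hval⟩ := ih (by omega)
    rw [pvOuterB_succ]
    have hmf : m < f.length := by omega
    set d' := (pvOuterB f m).set m (f.getD m 0) with hd'
    have hdl' : d'.length = f.length := by rw [hd', List.length_set]; exact hlen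
    have hspec := pvInnerB_spec f m hmf m (le_refl m) d' hdl'
      (fun i2 him him' => by
        have hieq : i2 = m := by omega
        rw [hieq, hd', pv_getD_set, if_pos ⟨rfl, by omega⟩, pvD, if_pos (le_refl m)])
      (fun i hi => by
        rw [hd', pv_getD_set, if_neg (by omega)]
        exact hval i hi)
    refine ⟨hspec.1, fun i hi => ?_⟩
    simpa using hspec.2 i (by omega)

theorem alt_eq_pvG (f : List Int) (h : f ≠ []) :
    max_beauty_dp_alt f = pvG f 0 (f.length - 1) := by
  have hn1 : 1 ≤ f.length := by
    cases f with | nil => simp at h | cons a t => simp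
  have hfold : max_beauty_dp_alt f
      = PySem.Int.floordiv (f.sum + (pvOuterB f f.length).getD 0 0) 2 := rfl
  rw [hfold, (pvOuterB_spec f f.length (le_refl _)).2 0 (by omega),
    pvD_eq f 0 (f.length - 1) (by omega)]
  have hsum : pvSum f 0 (f.length - 1) = f.sum := by
    rw [pvSum_split f 0 (f.length - 1) (by omega)]
    have : f.length - 1 + 1 = f.length := by omega
    rw [this]
    simp
  rw [hsum, PySem.Int.floordiv_eq_ediv_of_pos (by omega)]
  omega

-- ——— A side ———

-- proof-only names for the fold stages of port A (definitionally equal to its lets)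
def pvPre (f : List Int) (m : Nat) : List Int :=
  (List.range' 1 m).foldl (fun p k => p.set k (p.getD (k-1) 0 + f.getD (k-1) 0))
    (List.replicate (f.length+1) 0)

def pvTot (f : List Int) (a b : Nat) : Int :=
  (pvPre f f.length).getD (b+1) 0 - (pvPre f f.length).getD a 0

def pvDiag (f : List Int) (m : Nat) : List (List Int) :=
  (List.range m).foldl (fun d i => d.set i ((d.getD i []).set i (f.getD i 0)))
    (List.replicate f.length (List.replicate f.length 0))

def pvInn (f : List Int) (L : Nat) (d : List (List Int)) (m : Nat) : List (List Int) :=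
  (List.range m).foldl (fun d i =>
    d.set i ((d.getD i []).set (i+L-1)
      (pvTot f i (i+L-1) - min ((d.getD (i+1) []).getD (i+L-1) 0) ((d.getD i []).getD (i+L-1-1) 0)))) d

def pvOut (f : List Int) (M : Nat) : List (List Int) :=
  (List.range' 2 M).foldl (fun d L => pvInn f L d (f.length - L + 1)) (pvDiag f f.length)

theorem pvPre_succ (f : List Int) (m : Nat) :
    pvPre f (m+1) = (pvPre f m).set (1+m) ((pvPre f m).getD (1+m-1) 0 + f.getD (1+m-1) 0) := by
  unfold pvPre
  rw [List.range'_1_concat, List.foldl_append]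
  rfl

theorem pvPre_length (f : List Int) (m : Nat) : (pvPre f m).length = f.length + 1 := by
  induction m with
  | zero => simp [pvPre]
  | succ m ih => rw [pvPre_succ, List.length_set]; exact ih

theorem pvPre_getD (f : List Int) : ∀ m, m ≤ f.length → ∀ k,
    (pvPre f m).getD k 0 = if k ≤ m then (f.take k).sum else 0 := by
  intro m
  induction m with
  | zero =>
    intro _ k
    unfold pvPre
    simp only [List.range'_zero, List.foldl_nil, pv_getD_replicate]
    have hz : (if k < f.length + 1 then (0:Int) else 0) = 0 := by split <;> rfl
    rw [hz]
    split
    · next h => have hk : k = 0 := by omega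
                subst hk
                simp
    · rfl
  | succ m ih =>
    intro hm k
    rw [pvPre_succ, pv_getD_set, pvPre_length]
    by_cases hk : k = 1 + m
    · subst hk
      rw [if_pos ⟨rfl, by omega⟩, ih (by omega) (1+m-1)]
      have h1 : 1 + m - 1 = m := by omega
      rw [h1, if_pos (le_refl m), if_pos (by omega), show (1:ℕ) + m = m + 1 from by omega,
        sum_take_succ]
    · rw [if_neg (by omega), ih (by omega) k]
      by_cases h2 : k ≤ m
      · rw [if_pos h2, if_pos (by omega)]
      · rw [if_neg h2, if_neg (by omega)]

theorem pvTot_eq (f : List Int) (a b : Nat) (hab : a ≤ b) (hb : b < f.length) :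
    pvTot f a b = pvSum f a b := by
  unfold pvTot
  rw [pvPre_getD f f.length (le_refl _) (b+1), pvPre_getD f f.length (le_refl _) a,
    if_pos (by omega), if_pos (by omega), pvSum_split f a b (by omega)]

theorem pvDiag_succ (f : List Int) (m : Nat) :
    pvDiag f (m+1) = (pvDiag f m).set m (((pvDiag f m).getD m []).set m (f.getD m 0)) := by
  unfold pvDiag
  rw [List.range_succ, List.foldl_append]
  rfl

theorem pvDiag_length (f : List Int) (m : Nat) : (pvDiag f m).length = f.length := by
  induction m with
  | zero => simp [pvDiag]
  | succ m ih => rw [pvDiag_succ, List.length_set]; exact ih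

theorem pvDiag_rowlen (f : List Int) (m : Nat) (a : Nat) :
    ((pvDiag f m).getD a []).length = if a < f.length then f.length else 0 := by
  induction m with
  | zero =>
    unfold pvDiag
    simp only [List.range_zero, List.foldl_nil, pv_getD_replicate]
    split <;> simp
  | succ m ih =>
    rw [pvDiag_succ, pv_getD_set, pvDiag_length]
    by_cases h : a = m ∧ m < f.length
    · obtain ⟨ha, hmf⟩ := h
      subst ha
      rw [if_pos ⟨rfl, hmf⟩, List.length_set]
      exact ih
    · rw [if_neg h]
      exact ih

theorem pvDiag_getD (f : List Int) : ∀ m, m ≤ f.length → ∀ a b,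
    ((pvDiag f m).getD a []).getD b 0 = if a = b ∧ a < m then f.getD a 0 else 0 := by
  intro m
  induction m with
  | zero =>
    intro _ a b
    unfold pvDiag
    simp only [List.range_zero, List.foldl_nil, pv_getD_replicate]
    rw [if_neg (show ¬ (a = b ∧ a < 0) from by omega)]
    split
    · rw [pv_getD_replicate]
      split <;> rfl
    · simp
  | succ m ih =>
    intro hm a b
    rw [pvDiag_succ, pv_getD_set, pvDiag_length]
    by_cases h : a = m ∧ m < f.length
    · obtain ⟨ha, hmf⟩ := h
      subst ha
      rw [if_pos ⟨rfl, hmf⟩, pv_getD_set]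
      have hrlm : ((pvDiag f a).getD a []).length = f.length := by
        rw [pvDiag_rowlen, if_pos hmf]
      rw [hrlm]
      by_cases hb : b = a
      · subst hb
        rw [if_pos ⟨rfl, hmf⟩, if_pos ⟨rfl, by omega⟩]
      · rw [if_neg (by omega), ih (by omega) a b, if_neg (by omega), if_neg (by omega)]
    · rw [if_neg h, ih (by omega) a b]
      by_cases h2 : a = b ∧ a < m
      · rw [if_pos h2, if_pos ⟨h2.1, by omega⟩]
      · by_cases h3 : a = b ∧ a < m + 1
        · exfalso
          exact h ⟨by omega, by omega⟩
        · rw [if_neg h2, if_neg h3]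

theorem pvInn_succ (f : List Int) (L : Nat) (d : List (List Int)) (m : Nat) :
    pvInn f L d (m+1) = (pvInn f L d m).set m (((pvInn f L d m).getD m []).set (m+L-1)
      (pvTot f m (m+L-1) - min (((pvInn f L d m).getD (m+1) []).getD (m+L-1) 0)
        (((pvInn f L d m).getD m []).getD (m+L-1-1) 0))) := by
  unfold pvInn
  rw [List.range_succ, List.foldl_append]
  rfl

theorem pvInn_length (f : List Int) (L : Nat) (d : List (List Int)) (m : Nat) :
    (pvInn f L d m).length = d.length := by
  induction m with
  | zero => simp [pvInn]
  | succ m ih => rw [pvInn_succ, List.length_set]; exact ih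

theorem pvInn_rowlen (f : List Int) (L : Nat) (d : List (List Int)) (m : Nat) (a : Nat) :
    ((pvInn f L d m).getD a []).length = (d.getD a []).length := by
  induction m with
  | zero => simp [pvInn]
  | succ m ih =>
    rw [pvInn_succ, pv_getD_set]
    split
    · next h =>
      obtain ⟨ha, _⟩ := h
      subst ha
      rw [List.length_set]
      exact ih
    · exact ih

theorem pvInn_getD (f : List Int) (L : Nat) (hL : 2 ≤ L) (d : List (List Int))
    (hdl : d.length = f.length)
    (hrl : ∀ a, (d.getD a []).length = if a < f.length then f.length else 0)
    (hd : ∀ a b, a ≤ b → b < f.length → b - a + 1 < L → (d.getD a []).getD b 0 = pvG f a b) :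
    ∀ m, m ≤ f.length - L + 1 →
      ∀ a b, a ≤ b → b < f.length →
        (b - a + 1 < L ∨ (b - a + 1 = L ∧ a < m)) →
        ((pvInn f L d m).getD a []).getD b 0 = pvG f a b := by
  intro m
  induction m with
  | zero =>
    intro _ a b hab hbn hcase
    unfold pvInn
    simp only [List.range_zero, List.foldl_nil]
    exact hd a b hab hbn (by omega)
  | succ m ih =>
    intro hm a b hab hbn hcase
    have hm' : m ≤ f.length - L + 1 := by omega
    rw [pvInn_succ, pv_getD_set, pvInn_length, hdl]
    by_cases hit : a = m ∧ b = m + L - 1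
    · obtain ⟨ha, hb⟩ := hit
      subst ha
      subst hb
      have hmf : a < f.length := by omega
      rw [if_pos ⟨rfl, hmf⟩, pv_getD_set]
      have hrlm : ((pvInn f L d a).getD a []).length = f.length := by
        rw [pvInn_rowlen, hrl, if_pos hmf]
      rw [hrlm, if_pos ⟨rfl, by omega⟩,
        ih hm' (a+1) (a + L - 1) (by omega) (by omega) (Or.inl (by omega)),
        ih hm' a (a + L - 1 - 1) (by omega) (by omega) (Or.inl (by omega)),
        pvTot_eq f a (a + L - 1) (by omega) (by omega), pvG_lt f a (a + L - 1) (by omega)]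
    · have hfall : (b - a + 1 < L ∨ (b - a + 1 = L ∧ a < m)) := by
        rcases hcase with hca | hca
        · exact Or.inl hca
        · refine Or.inr ⟨hca.1, ?_⟩
          rcases Nat.lt_succ_iff_lt_or_eq.mp hca.2 with h2 | h2
          · exact h2
          · exfalso; exact hit ⟨h2, by omega⟩
      by_cases hrow : a = m ∧ m < f.length
      · obtain ⟨ha, hmf⟩ := hrow
        subst ha
        rw [if_pos ⟨rfl, hmf⟩, pv_getD_set]
        have hrlm : ((pvInn f L d a).getD a []).length = f.length := by
          rw [pvInn_rowlen, hrl, if_pos hmf]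
        rw [hrlm, if_neg (show ¬ (b = a + L - 1 ∧ a + L - 1 < f.length) from
          fun hc => hit ⟨rfl, hc.1⟩)]
        exact ih hm' a b hab hbn hfall
      · rw [if_neg hrow]
        exact ih hm' a b hab hbn hfall

theorem pvOut_succ (f : List Int) (M : Nat) :
    pvOut f (M+1) = pvInn f (2+M) (pvOut f M) (f.length - (2+M) + 1) := by
  unfold pvOut
  rw [List.range'_1_concat, List.foldl_append]
  rfl

theorem pvOut_length (f : List Int) (M : Nat) : (pvOut f M).length = f.length := by
  induction M with
  | zero => simp [pvOut, pvDiag_length]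
  | succ M ih => rw [pvOut_succ, pvInn_length]; exact ih

theorem pvOut_rowlen (f : List Int) (M : Nat) (a : Nat) :
    ((pvOut f M).getD a []).length = if a < f.length then f.length else 0 := by
  induction M with
  | zero =>
    unfold pvOut
    simp only [List.range'_zero, List.foldl_nil]
    exact pvDiag_rowlen f f.length a
  | succ M ih => rw [pvOut_succ, pvInn_rowlen]; exact ih

theorem pvOut_getD (f : List Int) : ∀ M, M ≤ f.length - 1 →
    ∀ a b, a ≤ b → b < f.length → b - a + 1 < M + 2 →
      ((pvOut f M).getD a []).getD b 0 = pvG f a b := by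
  intro M
  induction M with
  | zero =>
    intro _ a b hab hbn hlen
    unfold pvOut
    simp only [List.range'_zero, List.foldl_nil]
    have hab' : a = b := by omega
    subst hab'
    rw [pvDiag_getD f f.length (le_refl _) a a, if_pos ⟨rfl, hbn⟩, pvG_le f a a (le_refl a)]
  | succ M ih =>
    intro hM a b hab hbn hlen
    rw [pvOut_succ]
    exact pvInn_getD f (2+M) (by omega) (pvOut f M) (pvOut_length f M) (pvOut_rowlen f M)
      (fun a b hab hbn hl => ih (by omega) a b hab hbn (by omega))
      (f.length - (2+M) + 1) (le_refl _) a b hab hbn (by omega)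

theorem a_eq_pvG (f : List Int) (h : f ≠ []) :
    max_beauty_dp f = pvG f 0 (f.length - 1) := by
  have hn1 : 1 ≤ f.length := by
    cases f with | nil => simp at h | cons a t => simp
  show ((pvOut f (f.length - 1)).getD 0 []).getD (f.length - 1) 0 = pvG f 0 (f.length - 1)
  exact pvOut_getD f (f.length - 1) (le_refl _) 0 (f.length - 1) (by omega) (by omega) (by omega)

-- ===== VERDICT (by name: the statement is the Claim_ definition above) =====
theorem max_beauty_dp_spec : Claim_equal_max_beauty_dp := by
  intro f _ hpre
  unfold Spec_max_beauty_dp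
  rw [a_eq_pvG f hpre, alt_eq_pvG f hpre]
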